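-- pv_equiv track=rewrite | github.com/plrodrigues/HM_HRT | src/genetic_algorithm/first_population.py | get_permutations_for_specific_tasks
-- ===== SOURCE A (Python) =====
-- import itertools
--
-- def regroup_permutations(
--     permutations_of_oders: list[list[tuple[int]]],
-- ) -> list[list[int]]:
--     result = []
--     for i in range(len(permutations_of_oders[0])):
--         temp = []
--         for j in range(len(permutations_of_oders)):
--             temp.extend(list(permutations_of_oders[j][i]))
--         result.append(temp)
--     return result
--
-- def get_permutations_for_specific_tasks(
--     tasks: list[int],
-- ) -> list[list[int]]:
--     n_elements_to_permute = 5
--     orders_sections = [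
--         tasks[i : i + n_elements_to_permute] for i in range(0, len(tasks), n_elements_to_permute)
--     ]
--
--     permutations_of_oders = [
--         list(itertools.permutations(order_section)) for order_section in orders_sections
--     ]
--     base_len = len(permutations_of_oders[0])
--     normalised_permutations_of_oders = []
--     for permut in permutations_of_oders:
--         if len(permut) < base_len:
--             permut = list(itertools.islice(itertools.cycle(permut), base_len))
--         normalised_permutations_of_oders.append(permut)
--
--     order_permutations = regroup_permutations(normalised_permutations_of_oders)
--     return order_permutations
-- ===== SOURCE B (Python) =====
-- from math import factorial
--
-- def get_permutations_for_specific_tasks(tasks):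
--     chunks = [tasks[i : i + 5] for i in range(0, len(tasks), 5)]
--     base_len = factorial(len(chunks[0]))
--     rows = []
--     for i in range(base_len):
--         row = []
--         for chunk in chunks:
--             k = i % factorial(len(chunk))
--             pool = list(chunk)
--             for _ in range(len(chunk)):
--                 f = factorial(len(pool) - 1)
--                 row.append(pool.pop(k // f))
--                 k %= f
--         rows.append(row)
--     return rows
-- ===== Notes on version B (the rewrite author's own statement) =====
-- stated objective: alternative
-- what changed: B never calls itertools.permutations: it unranks the needed permutation of each chunk directly from the row index via the factorial number system (Lehmer code, repeated pool.pop), instead of A's materialize-all-permutations / cycle-pad / transpose pipeline.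
-- outside the precondition, e.g. on get_permutations_for_specific_tasks([]): A raises IndexError, B raises IndexError
import Mathlib
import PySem

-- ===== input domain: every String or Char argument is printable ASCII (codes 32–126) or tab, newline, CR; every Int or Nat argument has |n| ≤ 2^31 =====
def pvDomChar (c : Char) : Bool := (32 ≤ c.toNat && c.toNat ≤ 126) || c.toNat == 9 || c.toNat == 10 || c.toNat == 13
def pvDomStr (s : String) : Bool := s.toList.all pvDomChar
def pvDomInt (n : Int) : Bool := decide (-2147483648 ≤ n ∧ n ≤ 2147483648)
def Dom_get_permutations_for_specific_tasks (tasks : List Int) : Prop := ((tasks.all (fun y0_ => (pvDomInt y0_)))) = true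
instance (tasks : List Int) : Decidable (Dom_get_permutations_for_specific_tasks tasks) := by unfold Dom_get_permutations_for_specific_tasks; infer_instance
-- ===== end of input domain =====

-- B unranks each chunk's permutation directly from the row index via the factorial number
-- system (Lehmer code), never materialising itertools.permutations lists (objective: alternative).

-- ===== PORT A =====

-- exact port of list(itertools.islice(itertools.cycle(xs), n)) for nonempty xs
-- (A only calls it with xs a nonempty permutation list)
def pvCycleTake (n : Nat) (xs : List (List Int)) : List (List Int) :=
  (List.range n).map (fun i => xs.getD (i % xs.length) [])

-- port of regroup_permutations; po[0] / po[j][i] are always in range at A's call site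
def pvRegroup (po : List (List (List Int))) : List (List Int) :=
  (List.range (po.getD 0 []).length).foldl
    (fun result i =>
      result ++ [(List.range po.length).foldl
        (fun temp j => temp ++ (po.getD j []).getD i []) []])
    []

def get_permutations_for_specific_tasks (tasks : List Int) : List (List Int) :=
  let n_elements_to_permute : Int := 5
  let orders_sections :=
    (PySem.List.pyRange 0 tasks.length n_elements_to_permute).map
      (fun i => PySem.List.slice tasks (some i) (some (i + n_elements_to_permute)))
  let permutations_of_oders :=
    orders_sections.map (fun s => PySem.List.permutations s s.length)
  -- permutations_of_oders[0] raises IndexError when tasks = []; that input is excluded by Pre_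
  let base_len := (permutations_of_oders.getD 0 []).length
  let normalised :=
    permutations_of_oders.foldl
      (fun acc permut =>
        acc ++ [if permut.length < base_len then pvCycleTake base_len permut else permut])
      []
  pvRegroup normalised

-- ===== PORT B =====

-- the body of B's innermost loop: row.append(pool.pop(k // f)); k %= f
-- (pool.pop's index is always in range at B's call sites, so getD's default is never read)
def pvStep (s : Nat × List Int × List Int) (_ : Nat) : Nat × List Int × List Int :=
  let f := Nat.factorial (s.2.1.length - 1)
  (s.1 % f, s.2.1.eraseIdx (s.1 / f), s.2.2 ++ [s.2.1.getD (s.1 / f) 0])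

def get_permutations_for_specific_tasks_alt (tasks : List Int) : List (List Int) :=
  let chunks :=
    (PySem.List.pyRange 0 tasks.length 5).map
      (fun i => PySem.List.slice tasks (some i) (some (i + 5)))
  -- chunks[0] raises IndexError when tasks = []; excluded by Pre_
  let base_len := Nat.factorial (chunks.getD 0 []).length
  (List.range base_len).foldl
    (fun rows i =>
      rows ++ [chunks.foldl
        (fun row chunk =>
          ((List.range chunk.length).foldl pvStep
            (i % Nat.factorial chunk.length, chunk, row)).2.2)
        []])
    []

-- ===== PRECONDITION & SPEC =====
-- Pre_ excludes only tasks = [], on which Python A raises IndexError (permutations_of_oders[0])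
def Pre_get_permutations_for_specific_tasks (tasks : List Int) : Prop := tasks ≠ []
instance (tasks : List Int) : Decidable (Pre_get_permutations_for_specific_tasks tasks) := by unfold Pre_get_permutations_for_specific_tasks; infer_instance
def pvWitness_get_permutations_for_specific_tasks : List Int := [1, 2, 3]

def Spec_get_permutations_for_specific_tasks (tasks : List Int) (out : List (List Int)) : Prop := out = get_permutations_for_specific_tasks_alt tasks
instance (tasks : List Int) (out : List (List Int)) : Decidable (Spec_get_permutations_for_specific_tasks tasks out) := by unfold Spec_get_permutations_for_specific_tasks; infer_instance

-- ===== CLAIM (what is proved, stated in full; the proofs are below) =====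
def Claim_equal_get_permutations_for_specific_tasks : Prop := ∀ (tasks : List Int), Dom_get_permutations_for_specific_tasks tasks → Pre_get_permutations_for_specific_tasks tasks → Spec_get_permutations_for_specific_tasks tasks (get_permutations_for_specific_tasks tasks)

-- ===== LEMMAS AND PROOFS =====

-- the chunk list both programs start from
def pvChunks (tasks : List Int) : List (List Int) :=
  (PySem.List.pyRange 0 tasks.length 5).map
    (fun i => PySem.List.slice tasks (some i) (some (i + 5)))

-- common intermediate form: row i = concatenation over chunks j of perms[j][i % len(perms[j])]
def pvModForm (tasks : List Int) : List (List Int) :=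
  let P := (pvChunks tasks).map (fun c => PySem.List.permutations c c.length)
  let b := (P.getD 0 []).length
  (List.range b).map (fun i =>
    (List.range P.length).flatMap (fun j =>
      let pj := P.getD j []
      pj.getD (i % pj.length) []))

-- Lehmer-code unranking, the recursive content of B's inner loop
def pvUnrank : Nat → List Int → Nat → List Int
  | 0, _, _ => []
  | m + 1, pool, k =>
      pool.getD (k / Nat.factorial m) 0 ::
        pvUnrank m (pool.eraseIdx (k / Nat.factorial m)) (k % Nat.factorial m)

-- a full permutation list is never empty
lemma perms_ne_nil : ∀ (r : Nat) (xs : List Int), xs.length = r →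
    PySem.List.permutations xs r ≠ [] := by
  intro r
  induction r with
  | zero => intro xs _; simp [PySem.List.permutations]
  | succ r ih =>
    intro xs hlen
    match xs, hlen with
    | y :: ys, hlen =>
      have hys : ys.length = r := by simpa using hlen
      simp only [PySem.List.permutations]
      intro hcontra
      have h0 : (0 : Nat) ∈ List.range (y :: ys).length := by simp
      have := List.flatMap_eq_nil_iff.mp hcontra 0 h0
      simp only [List.getElem?_cons_zero] at this
      exact ih ys hys (by simpa using List.map_eq_nil_iff.mp this)

-- the normalisation loop is a map
lemma normalised_eq_map (P : List (List (List Int))) (b : Nat) :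
    P.foldl (fun acc permut =>
        acc ++ [if permut.length < b then pvCycleTake b permut else permut]) []
      = P.map (fun permut => if permut.length < b then pvCycleTake b permut else permut) := by
  simpa using PySem.List.foldl_append_singleton_eq_map
    (l := P) (f := fun permut => if permut.length < b then pvCycleTake b permut else permut)
    (acc := [])

lemma getD_map {α β : Type} (f : α → β) (l : List α) (j : Nat) (d : β) (d' : α) (hj : j < l.length) :
    (l.map f).getD j d = f (l.getD j d') := by
  simp [List.getD, List.getElem?_map, (List.getElem?_eq_some_iff.mpr ⟨hj, rfl⟩)]

-- the key per-cell fact on A's side: normalised[j][i] = perms[j][i % len(perms[j])]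
lemma cell_eq (pj : List (List Int)) (b i : Nat) (hi : i < b) (hne : pj ≠ []) :
    (if pj.length < b then pvCycleTake b pj else pj).getD i []
      = pj.getD (i % pj.length) [] := by
  have hpos : 0 < pj.length := List.length_pos_iff.mpr hne
  split_ifs with h
  · unfold pvCycleTake
    rw [getD_map _ _ _ _ 0 (by simpa using hi)]
    simp [List.getD, hi]
  · have hib : i < pj.length := lt_of_lt_of_le hi (not_lt.mp h)
    rw [Nat.mod_eq_of_lt hib]

-- A equals the modulo form
lemma A_eq_modForm (tasks : List Int) :
    get_permutations_for_specific_tasks tasks = pvModForm tasks := by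
  unfold get_permutations_for_specific_tasks pvModForm pvChunks
  simp only []
  set P := ((PySem.List.pyRange 0 tasks.length 5).map
      (fun i => PySem.List.slice tasks (some i) (some (i + 5)))).map
      (fun s => PySem.List.permutations s s.length) with hP
  set b := (P.getD 0 []).length with hb
  have hPne : ∀ pj ∈ P, pj ≠ [] := by
    intro pj hpj
    rw [hP] at hpj
    obtain ⟨s, _, rfl⟩ := List.mem_map.mp hpj
    exact perms_ne_nil s.length s rfl
  rw [normalised_eq_map]
  set g := fun permut : List (List Int) =>
    if permut.length < b then pvCycleTake b permut else permut with hg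
  unfold pvRegroup
  rw [PySem.List.foldl_append_singleton_eq_map]
  simp only [List.nil_append, List.length_map]
  have houter : ((P.map g).getD 0 []).length = b := by
    match hP0 : P with
    | [] => simp [hb]
    | p0 :: rest =>
      have : g p0 = p0 := by
        rw [hg]; simp only [hb]
        simp [List.getD]
      simp [List.getD, this, hb]
  rw [houter]
  apply List.map_congr_left
  intro i hi
  have hib : i < b := List.mem_range.mp hi
  rw [PySem.List.foldl_append_eq_flatMap]
  simp only [List.nil_append]
  apply List.flatMap_congr
  intro j hj
  have hjP : j < P.length := List.mem_range.mp hj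
  rw [getD_map _ _ _ _ [] hjP]
  have hmem : P.getD j [] ∈ P := by
    rw [List.getD_eq_getElem P [] hjP]; exact List.getElem_mem hjP
  exact cell_eq (P.getD j []) b i hib (hPne _ hmem)

-- the counter of B's inner loop is ignored, so the fold peels from the front
lemma foldl_range_succ_pvStep (n : Nat) (s : Nat × List Int × List Int) :
    (List.range (n + 1)).foldl pvStep s = (List.range n).foldl pvStep (pvStep s 0) := by
  rw [List.range_succ_eq_map]
  simp only [List.foldl_cons, List.foldl_map]
  rfl

-- B's inner loop appends exactly the Lehmer unranking of the pool
lemma rowLoop_eq : ∀ (m : Nat) (pool : List Int) (k : Nat) (row : List Int),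
    pool.length = m → k < Nat.factorial m →
    ((List.range m).foldl pvStep (k, pool, row)).2.2 = row ++ pvUnrank m pool k := by
  intro m
  induction m with
  | zero => intro pool k row _ _; simp [pvUnrank]
  | succ m ih =>
    intro pool k row hlen hk
    rw [foldl_range_succ_pvStep]
    have hk2 : k < Nat.factorial m * (m + 1) := by
      rw [Nat.mul_comm, ← Nat.factorial_succ]; exact hk
    have hq : k / Nat.factorial m < m + 1 := Nat.div_lt_of_lt_mul hk2
    have hstep : pvStep (k, pool, row) 0
        = (k % Nat.factorial m, pool.eraseIdx (k / Nat.factorial m),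
            row ++ [pool.getD (k / Nat.factorial m) 0]) := by
      simp [pvStep, hlen]
    rw [hstep]
    rw [ih _ _ _ (by rw [List.length_eraseIdx_of_lt (by omega)]; omega)
      (Nat.mod_lt _ (Nat.factorial_pos m))]
    simp [pvUnrank]

-- the full permutation list of an m-element list has m! entries
lemma perms_length : ∀ (m : Nat) (xs : List Int), xs.length = m →
    (PySem.List.permutations xs m).length = Nat.factorial m := by
  intro m
  induction m with
  | zero => intro xs _; simp [PySem.List.permutations, Nat.factorial]
  | succ m ih =>
    intro xs hlen
    match xs, hlen with
    | y :: ys, hlen =>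
      simp only [PySem.List.permutations, List.length_flatMap]
      refine Eq.trans (congrArg List.sum (List.map_congr_left
          (g := fun _ => Nat.factorial m) ?_)) ?_
      · intro i hi
        have hi' : i < (y :: ys).length := List.mem_range.mp hi
        rw [List.getElem?_eq_getElem hi']
        simp only [List.length_map]
        exact ih _ (by rw [List.length_eraseIdx_of_lt hi', hlen]; omega)
      · simp [List.map_const', hlen, Nat.factorial_succ, Nat.mul_comm]

-- indexing a flatMap whose blocks all have length m
lemma flatMap_getD_uniform {α β : Type} :
    ∀ (l : List α) (f : α → List β) (m : Nat), 0 < m →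
    (∀ a ∈ l, (f a).length = m) → ∀ (k : Nat), k < l.length * m → ∀ (d : β) (da : α),
    (l.flatMap f).getD k d = (f (l.getD (k / m) da)).getD (k % m) d := by
  intro l
  induction l with
  | nil => intro f m _ _ k hk; simp at hk
  | cons a l ih =>
    intro f m hm hlen k hk d da
    have ha : (f a).length = m := hlen a (List.mem_cons_self)
    rw [List.flatMap_cons]
    by_cases hcase : k < m
    · rw [List.getD_append _ _ _ _ (by rw [ha]; exact hcase)]
      rw [Nat.div_eq_of_lt hcase, Nat.mod_eq_of_lt hcase]
      simp [List.getD]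
    · push_neg at hcase
      rw [List.getD_append_right _ _ _ _ (by rw [ha]; exact hcase)]
      rw [ha]
      have hksub : k - m < l.length * m := by
        have h1 : k < l.length * m + m := by
          have h := hk
          rw [List.length_cons, Nat.succ_mul] at h
          exact h
        omega
      rw [ih f m hm (fun x hx => hlen x (List.mem_cons_of_mem a hx)) (k - m) hksub d da]
      have hdiv : k / m = (k - m) / m + 1 := by
        conv_lhs => rw [show k = k - m + m from (Nat.sub_add_cancel hcase).symm]
        rw [Nat.add_div_right _ hm]
      have hmod : k % m = (k - m) % m := by
        conv_lhs => rw [show k = k - m + m from (Nat.sub_add_cancel hcase).symm]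
        rw [Nat.add_mod_right]
      rw [hdiv, hmod, List.getD_cons_succ]

-- the k-th itertools permutation is the Lehmer unranking at k
lemma perm_getD : ∀ (m : Nat) (xs : List Int) (k : Nat), xs.length = m →
    k < Nat.factorial m →
    (PySem.List.permutations xs m).getD k [] = pvUnrank m xs k := by
  intro m
  induction m with
  | zero =>
    intro xs k _ hk
    interval_cases k
    simp [PySem.List.permutations, pvUnrank]
  | succ m ih =>
    intro xs k hlen hk
    match xs, hlen with
    | y :: ys, hlen =>
      simp only [PySem.List.permutations]
      have hk2 : k < Nat.factorial m * (m + 1) := by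
        rw [Nat.mul_comm, ← Nat.factorial_succ]; exact hk
      have hq : k / Nat.factorial m < m + 1 := Nat.div_lt_of_lt_mul hk2
      have hq' : k / Nat.factorial m < (y :: ys).length := by rw [hlen]; exact hq
      refine (flatMap_getD_uniform _ _ (Nat.factorial m) (Nat.factorial_pos m) ?_ k ?_ [] 0).trans ?_
      · intro i hi
        have hi' : i < (y :: ys).length := List.mem_range.mp hi
        rw [List.getElem?_eq_getElem hi']
        simp only [List.length_map]
        exact perms_length _ _ (by rw [List.length_eraseIdx_of_lt hi', hlen]; omega)
      · rw [List.length_range, hlen]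
        calc k < Nat.factorial (m + 1) := hk
          _ = (m + 1) * Nat.factorial m := Nat.factorial_succ m
      · have hidx : (List.range (y :: ys).length).getD (k / Nat.factorial m) 0
            = k / Nat.factorial m := by
          rw [List.getD_eq_getElem _ 0 (by simpa using hq')]
          simp
        rw [hidx, List.getElem?_eq_getElem hq']
        rw [getD_map _ _ _ _ [] (by
          rw [perms_length _ _ (by rw [List.length_eraseIdx_of_lt hq', hlen]; omega)]
          exact Nat.mod_lt _ (Nat.factorial_pos m))]
        rw [ih _ _ (by rw [List.length_eraseIdx_of_lt hq', hlen]; omega) (Nat.mod_lt _ (Nat.factorial_pos m))]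
        simp [pvUnrank, List.getD, List.getElem?_eq_getElem hq']

-- flatMap over indices with getD is flatMap over the list
lemma flatMap_range_getD {α β : Type} :
    ∀ (l : List α) (h : α → List β) (d : α),
    (List.range l.length).flatMap (fun j => h (l.getD j d)) = l.flatMap h := by
  intro l h d
  induction l with
  | nil => simp
  | cons a l ih =>
    rw [List.length_cons, List.range_succ_eq_map, List.flatMap_cons, List.flatMap_map]
    simpa using ih

-- B equals the modulo form (for nonempty tasks)
lemma B_eq_modForm (tasks : List Int) (hne : tasks ≠ []) :
    get_permutations_for_specific_tasks_alt tasks = pvModForm tasks := by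
  unfold get_permutations_for_specific_tasks_alt pvModForm pvChunks
  simp only []
  set chunks := (PySem.List.pyRange 0 tasks.length 5).map
      (fun i => PySem.List.slice tasks (some i) (some (i + 5))) with hchunks
  set P := chunks.map (fun c => PySem.List.permutations c c.length) with hP
  -- chunks is nonempty
  have hlenpos : 0 < tasks.length := List.length_pos_iff.mpr hne
  have hmem0 : (0 : Int) ∈ PySem.List.pyRange 0 tasks.length 5 := by
    rw [PySem.List.mem_pyRange_iff_of_pos (by omega)]
    constructor
    · omega
    constructor
    · exact_mod_cast hlenpos
    · decide
  have hchne : chunks ≠ [] := by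
    rw [hchunks]
    exact List.ne_nil_of_mem (List.mem_map_of_mem hmem0)
  obtain ⟨c0, rest, hc0⟩ := List.exists_cons_of_ne_nil hchne
  -- the two row counts agree
  have hbase : (P.getD 0 []).length = Nat.factorial (chunks.getD 0 []).length := by
    rw [hP, hc0]
    simp only [List.map_cons, List.getD_cons_zero]
    exact perms_length _ _ rfl
  rw [PySem.List.foldl_append_singleton_eq_map, ← hbase]
  simp only [List.nil_append]
  apply List.map_congr_left
  intro i _
  -- B's chunk fold appends the unranking of each chunk
  have hfold : ∀ (cs : List (List Int)) (row : List Int),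
      cs.foldl (fun row chunk =>
          ((List.range chunk.length).foldl pvStep
            (i % Nat.factorial chunk.length, chunk, row)).2.2) row
        = row ++ cs.flatMap (fun c => pvUnrank c.length c (i % Nat.factorial c.length)) := by
    intro cs
    induction cs with
    | nil => intro row; simp
    | cons c cs ihc =>
      intro row
      rw [List.foldl_cons, ihc, List.flatMap_cons,
        rowLoop_eq c.length c _ row rfl (Nat.mod_lt _ (Nat.factorial_pos _))]
      simp
  rw [hfold, List.nil_append,
    ← flatMap_range_getD chunks (fun c => pvUnrank c.length c (i % Nat.factorial c.length)) []]
  rw [hP]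
  simp only [List.length_map]
  apply List.flatMap_congr
  intro j hj
  have hjc : j < chunks.length := by
    simpa [hchunks, List.length_map] using List.mem_range.mp hj
  rw [getD_map (fun c => PySem.List.permutations c c.length) chunks j [] [] hjc]
  set cj := chunks.getD j [] with hcj
  rw [perm_getD cj.length cj _ rfl (by
    rw [← perms_length cj.length cj rfl]
    exact Nat.mod_lt _ (List.length_pos_iff.mpr (perms_ne_nil cj.length cj rfl)))]
  rw [perms_length cj.length cj rfl]

-- ===== VERDICT (by name: the statement is the Claim_ definition above) =====
theorem get_permutations_for_specific_tasks_spec : Claim_equal_get_permutations_for_specific_tasks := by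
  intro tasks _ hpre
  unfold Spec_get_permutations_for_specific_tasks
  rw [A_eq_modForm, B_eq_modForm tasks hpre]
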